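-- pv_equiv track=rewrite | github.com/jaehobang/cs7643_project | pipeline_jiashen.py | remap_indices
-- ===== SOURCE A (Python) =====
-- def remap_indices(potential_frame_indices, final_potential_frame_indices):
--     udf_i = 0
--     new_list = potential_frame_indices.copy()
--     for filter_i, value in enumerate(potential_frame_indices):
--         if value == 1:
--             new_list[filter_i] = final_potential_frame_indices[udf_i]
--             udf_i += 1
--     return new_list
-- ===== SOURCE B (Python) =====
-- def remap_indices(potential_frame_indices, final_potential_frame_indices):
--     # Split the list at the 1-entries into segments of non-1 values,
--     # then rebuild it by joining the segments with successive replacement values.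
--     segments = []
--     cur = []
--     for v in potential_frame_indices:
--         if v == 1:
--             segments.append(cur)
--             cur = []
--         else:
--             cur.append(v)
--     segments.append(cur)
--     out = []
--     for k in range(len(segments) - 1):
--         out += segments[k] + [final_potential_frame_indices[k]]
--     return out + segments[-1]
-- ===== Notes on version B (the rewrite author's own statement) =====
-- stated objective: alternative
-- what changed: Replaces A's copy-then-overwrite scan with a moving counter by a split/join algorithm: the list is split at the 1-entries into segments of non-1 values, and the result is rebuilt by concatenating the segments interleaved with the successive replacement values (no copy, no in-place assignment, no position counter during the scan).
import Mathlib
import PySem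

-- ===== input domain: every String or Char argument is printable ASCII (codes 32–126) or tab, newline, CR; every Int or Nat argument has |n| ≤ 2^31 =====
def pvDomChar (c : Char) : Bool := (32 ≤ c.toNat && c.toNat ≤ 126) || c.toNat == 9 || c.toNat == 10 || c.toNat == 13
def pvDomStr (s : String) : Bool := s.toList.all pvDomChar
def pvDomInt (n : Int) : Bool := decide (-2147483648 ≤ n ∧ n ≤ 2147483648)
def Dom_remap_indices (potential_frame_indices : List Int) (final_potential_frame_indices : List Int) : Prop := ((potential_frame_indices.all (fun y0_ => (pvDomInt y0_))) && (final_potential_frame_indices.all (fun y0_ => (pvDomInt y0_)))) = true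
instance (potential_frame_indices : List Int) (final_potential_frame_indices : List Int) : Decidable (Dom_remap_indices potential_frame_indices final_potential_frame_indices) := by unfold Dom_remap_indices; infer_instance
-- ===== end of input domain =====

-- B replaces A's copy-then-overwrite scan (moving replacement counter, in-place assignment)
-- by a split/join algorithm: split the list at the 1-entries into non-1 segments, then rebuild
-- it by joining the segments with successive replacement values; alternative, same cost.

-- ===== PORT A =====
-- the 'for filter_i, value in enumerate(...)' loop, carrying (filter_i, udf_i, new_list);
-- final_potential_frame_indices[udf_i] is PySem.List.pyGet? (none = IndexError, excluded by
-- Pre_; the .getD 0 default is unreachable inside Pre_)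
def remapALoop (f : List Int) : Nat → Nat → List Int → List Int → List Int
  | _, _, new_list, [] => new_list
  | filter_i, udf_i, new_list, value :: rest =>
      if value == 1 then
        remapALoop f (filter_i + 1) (udf_i + 1)
          (new_list.set filter_i ((PySem.List.pyGet? f (Int.ofNat udf_i)).getD 0)) rest
      else
        remapALoop f (filter_i + 1) udf_i new_list rest

def remap_indices (potential_frame_indices : List Int) (final_potential_frame_indices : List Int) : List Int :=
  remapALoop final_potential_frame_indices 0 0 potential_frame_indices potential_frame_indices

-- ===== PORT B =====
-- split pass: the first loop, carrying 'cur'; final 'segments.append(cur)' gives the [cur] base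
def splitSegs : List Int → List Int → List (List Int)
  | cur, [] => [cur]
  | cur, v :: rest => if v == 1 then cur :: splitSegs [] rest else splitSegs (cur ++ [v]) rest

-- join pass: 'for k in range(len(segments)-1): out += segments[k] + [f[k]]' then '+ segments[-1]'
def joinSegs (f : List Int) : Nat → List (List Int) → List Int
  | _, [] => []
  | _, [seg] => seg
  | k, seg :: s :: t =>
      seg ++ ((PySem.List.pyGet? f (Int.ofNat k)).getD 0) :: joinSegs f (k + 1) (s :: t)

def remap_indices_alt (potential_frame_indices : List Int) (final_potential_frame_indices : List Int) : List Int :=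
  joinSegs final_potential_frame_indices 0 (splitSegs [] potential_frame_indices)

-- ===== PRECONDITION & SPEC =====
-- Pre_ excludes exactly the inputs where Python A raises IndexError: more 1-entries than
-- replacement values (B raises IndexError there as well).
def Pre_remap_indices (potential_frame_indices : List Int) (final_potential_frame_indices : List Int) : Prop :=
  potential_frame_indices.count 1 ≤ final_potential_frame_indices.length
instance (potential_frame_indices : List Int) (final_potential_frame_indices : List Int) : Decidable (Pre_remap_indices potential_frame_indices final_potential_frame_indices) := by unfold Pre_remap_indices; infer_instance

def pvWitness_remap_indices : List Int × List Int := ([3, 1, 0, 1], [7, 8])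

def Spec_remap_indices (potential_frame_indices : List Int) (final_potential_frame_indices : List Int) (out : List Int) : Prop := out = remap_indices_alt potential_frame_indices final_potential_frame_indices
instance (potential_frame_indices : List Int) (final_potential_frame_indices : List Int) (out : List Int) : Decidable (Spec_remap_indices potential_frame_indices final_potential_frame_indices out) := by unfold Spec_remap_indices; infer_instance

-- ===== CLAIM (what is proved, stated in full; the proofs are below) =====
def Claim_equal_remap_indices : Prop := ∀ (potential_frame_indices : List Int) (final_potential_frame_indices : List Int), Dom_remap_indices potential_frame_indices final_potential_frame_indices → Pre_remap_indices potential_frame_indices final_potential_frame_indices → Spec_remap_indices potential_frame_indices final_potential_frame_indices (remap_indices potential_frame_indices final_potential_frame_indices)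

-- ===== LEMMAS AND PROOFS =====
-- reference form both ports are reduced to: replace each 1 by f[u], f[u+1], …
def interleave (f : List Int) : Nat → List Int → List Int
  | _, [] => []
  | u, v :: rest =>
      if v == 1 then ((PySem.List.pyGet? f (Int.ofNat u)).getD 0) :: interleave f (u + 1) rest
      else v :: interleave f u rest

theorem remapALoop_eq_interleave (f : List Int) (p : List Int) :
    ∀ (pre : List Int) (u : Nat),
      remapALoop f pre.length u (pre ++ p) p = pre ++ interleave f u p := by
  induction p with
  | nil => intro pre u; simp [remapALoop, interleave]
  | cons v rest ih =>
      intro pre u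
      by_cases h : v = 1
      · have h2 := ih (pre ++ [(PySem.List.pyGet? f (Int.ofNat u)).getD 0]) (u + 1)
        simp at h2
        simp [remapALoop, interleave, h]
        simpa using h2
      · have h2 := ih (pre ++ [v]) u
        simp at h2
        simp [remapALoop, interleave, h]
        simpa using h2

theorem splitSegs_ne_nil (cur p : List Int) : splitSegs cur p ≠ [] := by
  cases p with
  | nil => simp [splitSegs]
  | cons v rest => by_cases h : v = 1 <;> simp [splitSegs, h, splitSegs_ne_nil]

theorem joinSegs_eq_interleave (f : List Int) (p : List Int) :
    ∀ (cur : List Int) (u : Nat),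
      joinSegs f u (splitSegs cur p) = cur ++ interleave f u p := by
  induction p with
  | nil => intro cur u; simp [splitSegs, joinSegs, interleave]
  | cons v rest ih =>
      intro cur u
      by_cases h : v = 1
      · obtain ⟨s, t, hst⟩ : ∃ s t, splitSegs ([] : List Int) rest = s :: t := by
          cases hx : splitSegs ([] : List Int) rest with
          | nil => exact absurd hx (splitSegs_ne_nil _ _)
          | cons s t => exact ⟨s, t, rfl⟩
        have h2 := ih ([] : List Int) (u + 1)
        rw [hst] at h2
        simp at h2
        simp [splitSegs, interleave, h, hst, joinSegs, h2]
      · have h2 := ih (cur ++ [v]) u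
        simp at h2
        simp [splitSegs, interleave, h]
        simpa using h2

-- ===== VERDICT (by name: the statement is the Claim_ definition above) =====
theorem remap_indices_spec : Claim_equal_remap_indices := by
  intro p f _ _
  unfold Spec_remap_indices remap_indices remap_indices_alt
  have hA := remapALoop_eq_interleave f p [] 0
  have hB := joinSegs_eq_interleave f p [] 0
  simp at hA hB
  rw [hA, hB]
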